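-- pv_equiv track=rewrite | github.com/TheosDetailing/UND | src/obsidian_note_gen/core.py | sanitize_topics
-- ===== SOURCE A (Python) =====
-- from typing import IO, List
--
-- TOPIC_LIST: List[str] = [
--     "Computers & Information",
--     "Philosophy",
--     "Psychology & Self-Help",
--     "Religion & Spirituality",
--     "Social Sciences",
--     "Politics & Government",
--     "Economics & Business",
--     "Education & Teaching",
--     "Language & Linguistics",
--     "Science (General)",
--     "Mathematics",
--     "Physics & Astronomy",
--     "Chemistry",
--     "Biology",
--     "Medicine & Health",
--     "Engineering & Technology",
--     "Arts & Design",
--     "Literature & Writing",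
--     "History & Geography",
--     "Travel & Recreation",
-- ]
--
-- def sanitize_topics(tops: list[str]) -> list[str]:
--     out = []
--     seen = set()
--     for t in tops:
--         if t in TOPIC_LIST and t not in seen:
--             out.append(t)
--             seen.add(t)
--         if len(out) >= 4:
--             break
--     return out
-- ===== SOURCE B (Python) =====
-- from typing import List
--
-- TOPIC_LIST: List[str] = [
--     "Computers & Information",
--     "Philosophy",
--     "Psychology & Self-Help",
--     "Religion & Spirituality",
--     "Social Sciences",
--     "Politics & Government",
--     "Economics & Business",
--     "Education & Teaching",
--     "Language & Linguistics",
--     "Science (General)",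
--     "Mathematics",
--     "Physics & Astronomy",
--     "Chemistry",
--     "Biology",
--     "Medicine & Health",
--     "Engineering & Technology",
--     "Arts & Design",
--     "Literature & Writing",
--     "History & Geography",
--     "Travel & Recreation",
-- ]
--
-- def sanitize_topics(tops: list[str]) -> list[str]:
--     # Invert the scan: for each allowed topic, locate its first occurrence in
--     # the input; dedup is automatic (each topic considered once), order is
--     # recovered by sorting on first-occurrence index.
--     occ = []
--     for topic in TOPIC_LIST:
--         try:
--             occ.append((tops.index(topic), topic))
--         except ValueError:
--             pass
--     occ.sort(key=lambda p: p[0])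
--     return [topic for _, topic in occ[:4]]
-- ===== Notes on version B (the rewrite author's own statement) =====
-- stated objective: alternative
-- what changed: B inverts the traversal: instead of scanning the input with a seen-set and early break, it iterates over the fixed allow-list TOPIC_LIST, records each topic's first-occurrence index in the input via .index(), sorts those pairs by index and keeps the first 4; dedup is implicit and no seen-set or break exists.
import Mathlib
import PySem

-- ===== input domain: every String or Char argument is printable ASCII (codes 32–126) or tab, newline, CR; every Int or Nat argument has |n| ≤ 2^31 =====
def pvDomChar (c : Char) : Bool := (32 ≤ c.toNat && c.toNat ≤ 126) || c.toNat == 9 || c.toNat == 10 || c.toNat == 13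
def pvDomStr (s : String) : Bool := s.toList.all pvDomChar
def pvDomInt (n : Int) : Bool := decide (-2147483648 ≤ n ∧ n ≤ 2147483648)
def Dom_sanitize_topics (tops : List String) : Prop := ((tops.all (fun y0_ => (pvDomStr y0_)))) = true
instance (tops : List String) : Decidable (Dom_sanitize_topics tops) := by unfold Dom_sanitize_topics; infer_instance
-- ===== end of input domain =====

-- B inverts the traversal: it scans the fixed allow-list, records each topic's first-occurrence
-- index in the input, sorts by that index and keeps the first 4 (alternative algorithm; same result).

def TOPIC_LIST : List String :=
  ["Computers & Information", "Philosophy", "Psychology & Self-Help",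
   "Religion & Spirituality", "Social Sciences", "Politics & Government",
   "Economics & Business", "Education & Teaching", "Language & Linguistics",
   "Science (General)", "Mathematics", "Physics & Astronomy", "Chemistry",
   "Biology", "Medicine & Health", "Engineering & Technology", "Arts & Design",
   "Literature & Writing", "History & Geography", "Travel & Recreation"]

-- ===== PORT A =====
-- the for-loop with its early 'break', as structural recursion over tops with state (out, seen)
def sanitizeGoA (tops : List String) (out : List String) (seen : PySem.Set String) : List String :=
  match tops with
  | [] => out
  | t :: rest =>
    let st := if TOPIC_LIST.contains t && !(PySem.Set.contains seen t)
              then (out ++ [t], PySem.Set.add seen t) else (out, seen)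
    if 4 ≤ st.1.length then st.1 else sanitizeGoA rest st.1 st.2

def sanitize_topics (tops : List String) : List String :=
  sanitizeGoA tops [] PySem.Set.empty

-- ===== PORT B =====
-- the for-loop over TOPIC_LIST with try: tops.index(topic) = filterMap with PySem.List.index?;
-- occ.sort(key=lambda p: p[0]) = PySem.List.sorted … (fun p => p.1) false; occ[:4] = take 4
def sanitize_topics_alt (tops : List String) : List String :=
  let occ := TOPIC_LIST.filterMap
    (fun topic => (PySem.List.index? tops topic).map (fun i => (i, topic)))
  ((PySem.List.sorted occ (fun p => p.1) false).take 4).map (fun p => p.2)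

-- ===== PRECONDITION & SPEC =====
def Spec_sanitize_topics (tops : List String) (out : List String) : Prop := out = sanitize_topics_alt tops
instance (tops : List String) (out : List String) : Decidable (Spec_sanitize_topics tops out) := by unfold Spec_sanitize_topics; infer_instance

-- ===== CLAIM =====
def Claim_equal_sanitize_topics : Prop := ∀ (tops : List String), Dom_sanitize_topics tops → Spec_sanitize_topics tops (sanitize_topics tops)

-- ===== LEMMAS AND PROOFS =====

-- the occurrence-pair function both sides of the B proof talk about
def occF (tops : List String) : String → Option (Nat × String) :=
  fun topic => (PySem.List.index? tops topic).map (fun i => (i, topic))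

-- foldl Set.add only ever appends to the accumulator
theorem foldl_add_prefix (xs : List String) :
    ∀ (s : List String), ∃ u, List.foldl PySem.Set.add s xs = s ++ u := by
  induction xs with
  | nil => exact fun s => ⟨[], by simp⟩
  | cons x rest ih =>
    intro s
    simp only [List.foldl_cons]
    by_cases h : x ∈ s
    · have hx : PySem.Set.add s x = s := by simp [PySem.Set.add, h]
      rw [hx]; exact ih s
    · have hx : PySem.Set.add s x = s ++ [x] := by simp [PySem.Set.add, h]
      rw [hx]
      obtain ⟨u, hu⟩ := ih (s ++ [x])
      exact ⟨x :: u, by simpa using hu⟩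

-- main invariant for A: from a nodup accumulator of length < 4 with seen = out,
-- A's loop computes take 4 of (foldl Set.add out (valid elements of tops))
theorem goA_eq (tops : List String) :
    ∀ (out : List String), out.Nodup → out.length < 4 →
      sanitizeGoA tops out out =
        (List.foldl PySem.Set.add out (tops.filter (fun t => TOPIC_LIST.contains t))).take 4 := by
  induction tops with
  | nil =>
    intro out _ hlen
    simp [sanitizeGoA, List.take_of_length_le (Nat.le_of_lt hlen)]
  | cons t rest ih =>
    intro out hnd hlen
    by_cases hv : t ∈ TOPIC_LIST
    · by_cases hmem : t ∈ out
      · have h4 : ¬ 4 ≤ out.length := by omega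
        simpa [sanitizeGoA, List.filter_cons, hv, hmem, PySem.Set.add, h4] using ih out hnd hlen
      · by_cases h4 : 4 ≤ out.length + 1
        · have hlen4 : (out ++ [t]).length = 4 := by simp; omega
          obtain ⟨u, hu⟩ := foldl_add_prefix (rest.filter (fun t => TOPIC_LIST.contains t)) (out ++ [t])
          simp only [List.contains_eq_mem] at hu
          have h3 : 3 ≤ out.length := by omega
          simp [sanitizeGoA, hv, hmem, PySem.Set.add, hu, h3]
          have hsplit : out ++ t :: u = (out ++ [t]) ++ u := by simp
          rw [hsplit, show (4:ℕ) = (out ++ [t]).length from hlen4.symm]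
          exact List.take_left.symm
        · have hnd' : (out ++ [t]).Nodup := by
            simp [List.nodup_append, hnd]
            exact fun a ha heq => hmem (heq ▸ ha)
          have h4' : ¬ 4 ≤ out.length + 1 := h4
          simpa [sanitizeGoA, List.filter_cons, hv, hmem, PySem.Set.add, h4'] using
            ih (out ++ [t]) hnd' (by simp; omega)
    · have h4 : ¬ 4 ≤ out.length := by omega
      simpa [sanitizeGoA, List.filter_cons, hv, h4] using ih out hnd hlen

-- hence A = take 4 of the ordered dedup of the valid topics
theorem A_eq_dedup (tops : List String) :
    sanitize_topics tops =
      (PySem.Set.ofList (tops.filter (fun t => TOPIC_LIST.contains t))).take 4 := by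
  unfold sanitize_topics
  rw [PySem.Set.ofList_eq_foldl]
  exact goA_eq tops [] List.nodup_nil (by decide)

-- the dedup of the valid topics, decorated with first-occurrence indices,
-- is strictly increasing in the index component
theorem occ'_pairwise (p : String → Bool) (xs : List String) :
    ((PySem.Set.ofList (xs.filter p)).filterMap (occF xs)).Pairwise
      (fun q r => q.1 < r.1) := by
  induction xs using List.reverseRecOn with
  | nil => simp [PySem.Set.ofList]
  | append_singleton xs x ih =>
    have hcongr : ∀ (L : List String), (∀ t ∈ L, t ∈ xs) →
        L.filterMap (occF (xs ++ [x])) = L.filterMap (occF xs) := by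
      intro L hL
      apply List.filterMap_congr
      intro t ht
      simp only [occF]
      rw [PySem.List.index?_append_of_mem [x] (hL t ht)]
    have hmemxs : ∀ t ∈ PySem.Set.ofList (xs.filter p), t ∈ xs := by
      intro t ht
      have := (PySem.Set.mem_ofList _ _).1 ht
      exact (List.mem_filter.1 this).1
    by_cases hp : p x
    · rw [List.filter_append, show List.filter p [x] = [x] by simp [hp]]
      rw [PySem.Set.ofList_eq_foldl, List.foldl_append]
      simp only [List.foldl_cons, List.foldl_nil]
      rw [← PySem.Set.ofList_eq_foldl]
      by_cases hx : x ∈ PySem.Set.ofList (xs.filter p)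
      · have : PySem.Set.add (PySem.Set.ofList (xs.filter p)) x
            = PySem.Set.ofList (xs.filter p) := by simp [PySem.Set.add, hx]
        rw [this, hcongr _ hmemxs]; exact ih
      · have hxa : PySem.Set.add (PySem.Set.ofList (xs.filter p)) x
            = PySem.Set.ofList (xs.filter p) ++ [x] := by simp [PySem.Set.add, hx]
        have hxnot : x ∉ xs := by
          intro hxm
          exact hx ((PySem.Set.mem_ofList _ _).2 (List.mem_filter.2 ⟨hxm, hp⟩))
        rw [hxa, List.filterMap_append, hcongr _ hmemxs]
        have hxocc : List.filterMap (occF (xs ++ [x])) [x] = [(xs.length, x)] := by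
          simp only [occF, List.filterMap_cons, List.filterMap_nil]
          rw [PySem.List.index?_append_singleton_self xs x hxnot]
          rfl
        rw [hxocc, List.pairwise_append]
        refine ⟨ih, List.pairwise_singleton _ _, ?_⟩
        intro q hq r hr
        simp only [List.mem_singleton] at hr
        subst hr
        obtain ⟨t, ht, hft⟩ := List.mem_filterMap.1 hq
        simp only [occF, Option.map_eq_some_iff] at hft
        obtain ⟨i, hi, hqeq⟩ := hft
        obtain ⟨hk, -, -⟩ := PySem.List.getElem_of_index?_eq_some hi
        simpa [← hqeq] using hk
    · rw [List.filter_append, show List.filter p [x] = [] by simp [hp], List.append_nil,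
        hcongr _ hmemxs]
      exact ih

-- the two decorated lists (over TOPIC_LIST and over the dedup) are permutations
theorem occ_perm (tops : List String) :
    ((PySem.Set.ofList (tops.filter (fun t => TOPIC_LIST.contains t))).filterMap (occF tops)).Perm
      (TOPIC_LIST.filterMap (occF tops)) := by
  have hinj : ∀ (a a' : String) (b : Nat × String),
      b ∈ occF tops a → b ∈ occF tops a' → a = a' := by
    intro a a' b hb hb'
    simp only [occF, Option.mem_def, Option.map_eq_some_iff] at hb hb'
    obtain ⟨i, -, hbe⟩ := hb; obtain ⟨j, -, hbe'⟩ := hb'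
    simpa using congrArg Prod.snd (hbe.trans hbe'.symm)
  have hnd1 : ((PySem.Set.ofList (tops.filter (fun t => TOPIC_LIST.contains t))).filterMap (occF tops)).Nodup :=
    (PySem.Set.nodup_ofList _).filterMap hinj
  have hnd2 : (TOPIC_LIST.filterMap (occF tops)).Nodup :=
    (by decide : TOPIC_LIST.Nodup).filterMap hinj
  apply List.perm_of_nodup_nodup_toFinset_eq hnd1 hnd2
  apply Finset.ext
  intro q
  simp only [List.mem_toFinset, List.mem_filterMap]
  constructor
  · rintro ⟨t, ht, hft⟩
    have := (PySem.Set.mem_ofList _ _).1 ht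
    exact ⟨t, by simpa using (List.mem_filter.1 this).2, hft⟩
  · rintro ⟨t, ht, hft⟩
    have hmem : t ∈ tops := by
      simp only [occF, Option.map_eq_some_iff] at hft
      obtain ⟨i, hi, -⟩ := hft
      exact (PySem.List.index?_isSome_iff tops t).1 (by rw [hi]; rfl)
    exact ⟨t, (PySem.Set.mem_ofList _ _).2
      (List.mem_filter.2 ⟨hmem, by simpa using ht⟩), hft⟩

-- mapping the decoration away gives the list back (every element has an index)
theorem map_snd_filterMap (tops : List String) :
    ∀ (L : List String), (∀ t ∈ L, t ∈ tops) →
      (L.filterMap (occF tops)).map (fun p => p.2) = L := by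
  intro L
  induction L with
  | nil => simp
  | cons t rest ih =>
    intro h
    have hmem : t ∈ tops := h t (List.mem_cons_self)
    obtain ⟨i, hi⟩ := Option.isSome_iff_exists.1 ((PySem.List.index?_isSome_iff tops t).2 hmem)
    simp only [List.filterMap_cons, occF, hi, Option.map_some]
    simpa using ih (fun a ha => h a (List.mem_cons_of_mem _ ha))

-- ===== VERDICT =====
theorem sanitize_topics_spec : Claim_equal_sanitize_topics := by
  intro tops _
  unfold Spec_sanitize_topics sanitize_topics_alt
  rw [A_eq_dedup]
  set L := PySem.Set.ofList (tops.filter (fun t => TOPIC_LIST.contains t)) with hL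
  have hsorted :
      PySem.List.sorted (TOPIC_LIST.filterMap (occF tops)) (fun p => p.1) false
        = L.filterMap (occF tops) :=
    PySem.List.sorted_eq_of_perm_of_pairwise_lt _ _ (fun p => p.1) (occ_perm tops)
      (occ'_pairwise (fun t => TOPIC_LIST.contains t) tops)
  show L.take 4 = _
  simp only [show (fun topic => (PySem.List.index? tops topic).map (fun i => (i, topic))) = occF tops from rfl,
    hsorted]
  rw [List.map_take, map_snd_filterMap tops L (fun t ht => (List.mem_filter.1 ((PySem.Set.mem_ofList _ _).1 ht)).1)]
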